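-- pv_equiv track=rewrite | github.com/rfsbraz/parliament | scripts/data_processing/mappers/coalition_detector.py | _extract_components_from_pattern
-- ===== SOURCE A (Python) =====
-- from typing import Dict, List, Optional, Tuple, Set
--
-- def _extract_components_from_pattern(sigla: str, rule: Dict) -> List[Dict[str, str]]:
--     """Extract component party siglas from coalition pattern"""
--     components = []
--
--     # Handle slash-separated patterns
--     if "/" in sigla:
--         parts = sigla.split("/")
--         for part in parts:
--             # Handle dot-separated sub-components
--             if "." in part:
--                 sub_parts = part.split(".")
--                 for sub_part in sub_parts:
--                     if sub_part:  # Skip empty parts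
--                         components.append({
--                             "sigla": sub_part,
--                             "nome": f"Partido {sub_part}"  # Generic name
--                         })
--             else:
--                 if part:  # Skip empty parts
--                     components.append({
--                         "sigla": part,
--                         "nome": f"Partido {part}"  # Generic name
--                     })
--
--     # Handle dot-separated only
--     elif "." in sigla:
--         parts = sigla.split(".")
--         for part in parts:
--             if part:  # Skip empty parts
--                 components.append({
--                     "sigla": part,
--                     "nome": f"Partido {part}"  # Generic name
--                 })
--
--     # Single entity (fallback)
--     else:
--         components.append({
--             "sigla": sigla,
--             "nome": f"Partido {sigla}"
--         })
--
--     return components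
-- ===== SOURCE B (Python) =====
-- def _extract_components_from_pattern(sigla: str, rule) -> list:
--     """Extract component party siglas from coalition pattern (single-pass scanner)."""
--     if "/" in sigla or "." in sigla:
--         parts, cur = [], []
--         for ch in sigla:
--             if ch == "/" or ch == ".":
--                 if cur:
--                     parts.append("".join(cur))
--                 cur = []
--             else:
--                 cur.append(ch)
--         if cur:
--             parts.append("".join(cur))
--     else:
--         parts = [sigla]
--     return [{"sigla": p, "nome": f"Partido {p}"} for p in parts]
-- ===== Notes on version B (the rewrite author's own statement) =====
-- stated objective: simpler
-- what changed: Replaced A's three-branch nested split('/')/split('.') loops with a single left-to-right character scanner that cuts tokens at either delimiter in one pass (keeping the whole-string fallback when no delimiter occurs).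
import Mathlib
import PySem

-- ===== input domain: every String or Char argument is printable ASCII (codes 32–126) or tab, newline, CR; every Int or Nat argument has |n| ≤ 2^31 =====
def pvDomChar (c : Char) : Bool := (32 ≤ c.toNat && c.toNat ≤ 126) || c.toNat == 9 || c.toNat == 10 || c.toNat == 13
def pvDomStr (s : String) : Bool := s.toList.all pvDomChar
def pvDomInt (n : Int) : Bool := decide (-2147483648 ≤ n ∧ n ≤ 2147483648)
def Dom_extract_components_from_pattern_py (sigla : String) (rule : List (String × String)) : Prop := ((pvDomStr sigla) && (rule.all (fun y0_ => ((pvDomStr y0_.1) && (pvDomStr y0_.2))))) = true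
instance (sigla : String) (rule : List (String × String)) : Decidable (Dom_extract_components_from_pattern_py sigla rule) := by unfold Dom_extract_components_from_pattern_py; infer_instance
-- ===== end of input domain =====

-- B replaces A's three-branch nested split/split loops by a single left-to-right scanner pass
-- that cuts the string at '/' or '.' while collecting non-empty tokens (objective: simpler decomposition).


-- ===== PORT A =====
-- {"sigla": p, "nome": f"Partido {p}"}
def mkComp (p : List Char) : List (String × String) :=
  [("sigla", String.ofList p), ("nome", String.ofList ("Partido ".toList ++ p))]

def extract_components_from_pattern_py (sigla : String) (_rule : List (String × String)) : List (List (String × String)) :=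
  let s := sigla.toList
  if PySem.Chars.isIn ['/'] s then
    -- parts = sigla.split("/") ; nested loop appending component dicts
    let parts := PySem.Chars.splitOn s ['/']
    parts.foldl (fun components part =>
      if PySem.Chars.isIn ['.'] part then
        (PySem.Chars.splitOn part ['.']).foldl (fun comps sub =>
          if sub ≠ [] then comps ++ [mkComp sub] else comps) components
      else if part ≠ [] then components ++ [mkComp part] else components) []
  else if PySem.Chars.isIn ['.'] s then
    (PySem.Chars.splitOn s ['.']).foldl (fun components part =>
      if part ≠ [] then components ++ [mkComp part] else components) []
  else
    [mkComp s]

-- ===== PORT B =====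
-- one scanner step: cut at '/' or '.', keep a non-empty current token
def bStep (st : List (List Char) × List Char) (ch : Char) : List (List Char) × List Char :=
  if ch == '/' || ch == '.' then
    (if st.2 = [] then st.1 else st.1 ++ [st.2], [])
  else
    (st.1, st.2 ++ [ch])

def extract_components_from_pattern_py_alt (sigla : String) (_rule : List (String × String)) : List (List (String × String)) :=
  let s := sigla.toList
  let parts :=
    if PySem.Chars.isIn ['/'] s || PySem.Chars.isIn ['.'] s then
      let st := s.foldl bStep ([], [])
      if st.2 = [] then st.1 else st.1 ++ [st.2]
    else
      [s]
  parts.map mkComp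

-- ===== PRECONDITION & SPEC =====
def Spec_extract_components_from_pattern_py (sigla : String) (rule : List (String × String)) (out : List (List (String × String))) : Prop := out = extract_components_from_pattern_py_alt sigla rule
instance (sigla : String) (rule : List (String × String)) (out : List (List (String × String))) : Decidable (Spec_extract_components_from_pattern_py sigla rule out) := by unfold Spec_extract_components_from_pattern_py; infer_instance

-- ===== CLAIM (what is proved, stated in full; the proofs are below) =====
def Claim_equal_extract_components_from_pattern_py : Prop := ∀ (sigla : String) (rule : List (String × String)), Dom_extract_components_from_pattern_py sigla rule → Spec_extract_components_from_pattern_py sigla rule (extract_components_from_pattern_py sigla rule)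

-- ===== LEMMAS AND PROOFS =====

-- reference splitter: split a char list at every char satisfying p (keeps empty pieces)
def splitP (p : Char → Bool) : List Char → List (List Char)
  | [] => [[]]
  | a :: t => if p a then [] :: splitP p t else (splitP p t).modifyHead (a :: ·)

theorem splitP_ne_nil (p : Char → Bool) (l : List Char) : splitP p l ≠ [] := by
  cases l with
  | nil => simp [splitP]
  | cons a t =>
    simp only [splitP]
    split
    · simp
    · cases h : splitP p t with
      | nil => exact absurd h (splitP_ne_nil p t)
      | cons x xs => simp

theorem splitP_of_not_mem (p : Char → Bool) (l : List Char) (h : ∀ a ∈ l, p a = false) :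
    splitP p l = [l] := by
  induction l with
  | nil => rfl
  | cons a t ih =>
    simp only [splitP, h a (by simp)]
    rw [ih (fun x hx => h x (by simp [hx]))]
    simp

theorem splitP_congr (p q : Char → Bool) (l : List Char) (h : ∀ a ∈ l, p a = q a) :
    splitP p l = splitP q l := by
  induction l with
  | nil => rfl
  | cons a t ih =>
    simp only [splitP, h a (by simp)]
    rw [ih (fun x hx => h x (by simp [hx]))]

theorem modifyHead_fun_id (l : List (List Char)) : l.modifyHead (fun x => x) = l := by
  cases l <;> simp

theorem isIn_singleton (c : Char) (l : List Char) :
    PySem.Chars.isIn [c] l = true ↔ c ∈ l := by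
  rw [PySem.Chars.isIn_iff_infix]
  constructor
  · intro h; exact (List.singleton_sublist.mp h.sublist)
  · intro h
    obtain ⟨s, t, rfl⟩ := List.append_of_mem h
    exact ⟨s, t, by simp⟩

theorem splitOn_go_eq (c : Char) (fuel : Nat) :
    ∀ (l cur : List Char) (acc : List (List Char)), l.length < fuel →
      PySem.Chars.splitOn.go [c] fuel l cur acc =
        acc.reverse ++ (splitP (· == c) l).modifyHead (cur.reverse ++ ·) := by
  induction fuel with
  | zero => intro l cur acc h; omega
  | succ f ih =>
    intro l cur acc h
    cases l with
    | nil => simp [PySem.Chars.splitOn.go, splitP]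
    | cons a rest =>
      by_cases hc : a = c
      · subst hc
        simp only [PySem.Chars.splitOn.go, List.isPrefixOf, beq_self_eq_true, Bool.true_and]
        rw [if_pos (by simp)]
        simp only [List.length_cons, List.length_nil, Nat.zero_add, List.drop_succ_cons, List.drop_zero]
        rw [ih rest [] (cur.reverse :: acc) (by simpa using Nat.lt_of_succ_lt_succ h)]
        simp [splitP, modifyHead_fun_id]
      · simp only [PySem.Chars.splitOn.go]
        rw [if_neg (by simp [List.isPrefixOf, Ne.symm hc]),
          ih rest (a :: cur) acc (by simpa using Nat.lt_of_succ_lt_succ h)]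
        have hne := splitP_ne_nil (· == c) rest
        cases hsp : splitP (· == c) rest with
        | nil => exact absurd hsp hne
        | cons x xs =>
          simp [splitP, hc, hsp, List.modifyHead]

theorem splitOn_singleton (c : Char) (l : List Char) :
    PySem.Chars.splitOn l [c] = splitP (· == c) l := by
  unfold PySem.Chars.splitOn
  rw [splitOn_go_eq c (l.length + 1) l [] [] (by omega)]
  have hne := splitP_ne_nil (· == c) l
  cases hsp : splitP (· == c) l with
  | nil => exact absurd hsp hne
  | cons x xs => simp [List.modifyHead]

-- A's append-only foldl over parts is a flatMap
theorem foldl_append_g (g : List Char → List (List (String × String)))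
    (parts : List (List Char)) (init : List (List (String × String))) :
    parts.foldl (fun acc part => acc ++ g part) init = init ++ parts.flatMap g := by
  induction parts generalizing init with
  | nil => simp
  | cons x xs ih => simp [List.foldl_cons, ih, List.append_assoc]

-- a filter-append foldl over pieces is filter-then-map
theorem foldl_filter_inner (ps : List (List Char)) :
    ∀ (init : List (List (String × String))),
      ps.foldl (fun comps sub => if sub ≠ [] then comps ++ [mkComp sub] else comps) init =
        init ++ (ps.filter (· ≠ [])).map mkComp := by
  induction ps with
  | nil => simp
  | cons x xs ih =>
    intro init
    by_cases hx : x = []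
    · simp only [List.foldl_cons, hx, ne_eq, not_true_eq_false, if_false, ih]
      simp
    · simp only [List.foldl_cons, ne_eq, hx, not_false_eq_true, if_true, ih, List.append_assoc]
      simp [hx]

-- the body of A's outer loop appends the non-empty '.'-pieces of the part
theorem body_eq (part : List Char) (components : List (List (String × String))) :
    (if PySem.Chars.isIn ['.'] part then
      (PySem.Chars.splitOn part ['.']).foldl (fun comps sub =>
        if sub ≠ [] then comps ++ [mkComp sub] else comps) components
    else if part ≠ [] then components ++ [mkComp part] else components) =
      components ++ ((splitP (· == '.') part).filter (· ≠ [])).map mkComp := by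
  by_cases hdot : '.' ∈ part
  · rw [if_pos ((isIn_singleton '.' part).mpr hdot), splitOn_singleton,
      foldl_filter_inner]
  · rw [if_neg (by simp [isIn_singleton, hdot])]
    rw [splitP_of_not_mem _ _ (fun a ha => by
      simp only [beq_eq_false_iff_ne, ne_eq]
      rintro rfl; exact hdot ha)]
    by_cases hp : part = [] <;> simp [hp]

-- pull a filter out of a flatMap of filtered pieces
theorem flatMap_filter (g : List Char → List (List Char)) (l : List (List Char)) :
    (l.flatMap fun x => (g x).filter (· ≠ [])) = (l.flatMap g).filter (· ≠ []) := by
  induction l with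
  | nil => rfl
  | cons x xs ih => simp only [List.flatMap_cons, List.filter_append, ih]

-- flatMap of the '.'-splits of the '/'-pieces is the combined split
theorem flatMap_splitP (p q : Char → Bool) (l : List Char) :
    (splitP p l).flatMap (splitP q) = splitP (fun a => p a || q a) l := by
  induction l with
  | nil => simp [splitP]
  | cons a t ih =>
    by_cases hp : p a
    · simp [splitP, hp, ih]
    · have hne := splitP_ne_nil p t
      cases hsp : splitP p t with
      | nil => exact absurd hsp hne
      | cons h r =>
        by_cases hq : q a
        · simp only [splitP, hp, hq, Bool.false_or, if_false, if_true, hsp,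
            List.modifyHead, List.flatMap_cons]
          rw [← ih, hsp]
          simp [splitP, hq]
        · simp only [splitP, hp, hq, Bool.false_or, if_false, hsp,
            List.modifyHead, List.flatMap_cons]
          rw [← ih, hsp]
          have hne2 := splitP_ne_nil q h
          cases hsq : splitP q h with
          | nil => exact absurd hsq hne2
          | cons y ys => simp [splitP, hq, hsq]

-- B's scanner fold computes the non-empty pieces of the combined split
theorem bScan_eq (l : List Char) :
    ∀ (P : List (List Char)) (C : List Char),
      (let st := l.foldl bStep (P, C)
       if st.2 = [] then st.1 else st.1 ++ [st.2]) =
        P ++ ((splitP (fun a => a == '/' || a == '.') l).modifyHead (C ++ ·)).filter (· ≠ []) := by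
  induction l with
  | nil =>
    intro P C
    by_cases hC : C = [] <;> simp [splitP, List.modifyHead, hC]
  | cons a t ih =>
    intro P C
    by_cases ha : (a == '/' || a == '.') = true
    · simp only [List.foldl_cons, bStep, ha, if_true]
      by_cases hC : C = []
      · rw [if_pos hC]
        have hih := ih P []
        simp only [List.nil_append, modifyHead_fun_id] at hih
        simp only [splitP, ha, if_true, List.modifyHead, hC]
        simpa [modifyHead_fun_id] using hih
      · rw [if_neg hC]
        simp only [splitP, ha, if_true, List.modifyHead]
        have := ih (P ++ [C]) []
        simp only at this
        rw [this]
        simp [hC, List.append_assoc, modifyHead_fun_id]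
    · have ha' : (a == '/' || a == '.') = false := by simpa using ha
      simp only [List.foldl_cons, bStep, ha', Bool.false_eq_true, if_false]
      have := ih P (C ++ [a])
      simp only at this
      rw [this]
      have hne := splitP_ne_nil (fun a => a == '/' || a == '.') t
      cases hsp : splitP (fun a => a == '/' || a == '.') t with
      | nil => exact absurd hsp hne
      | cons x xs =>
        simp [splitP, ha, hsp, List.modifyHead, List.append_assoc]

-- ===== VERDICT (by name: the statement is the Claim_ definition above) =====
-- both programs return map mkComp of the same token list
theorem extract_components_from_pattern_py_spec : Claim_equal_extract_components_from_pattern_py := by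
  intro sigla rule _
  unfold Spec_extract_components_from_pattern_py
  show extract_components_from_pattern_py sigla rule = extract_components_from_pattern_py_alt sigla rule
  unfold extract_components_from_pattern_py extract_components_from_pattern_py_alt
  simp only []
  set s := sigla.toList with hs
  have hmk : mkComp = mkComp := rfl
  by_cases hsl : '/' ∈ s
  · -- slash branch of A; scanner branch of B
    rw [if_pos ((isIn_singleton '/' s).mpr hsl),
      if_pos (by rw [(isIn_singleton '/' s).mpr hsl]; simp)]
    have hB := bScan_eq s [] []
    simp only [List.nil_append, modifyHead_fun_id] at hB
    rw [hB, splitOn_singleton]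
    simp only [body_eq]
    rw [foldl_append_g (fun part => ((splitP (· == '.') part).filter (· ≠ [])).map mkComp)]
    rw [List.nil_append, ← List.map_flatMap, flatMap_filter, flatMap_splitP]
  · by_cases hdot : '.' ∈ s
    · -- dot-only branch
      rw [if_neg (by simp [isIn_singleton, hsl]),
        if_pos ((isIn_singleton '.' s).mpr hdot),
        if_pos (by rw [(isIn_singleton '.' s).mpr hdot]; simp)]
      have hB := bScan_eq s [] []
      simp only [List.nil_append, modifyHead_fun_id] at hB
      rw [hB, splitOn_singleton, foldl_filter_inner, List.nil_append]
      rw [splitP_congr (fun a => a == '/' || a == '.') (· == '.') s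
        (fun a ha => by
          have : a ≠ '/' := fun h => hsl (h ▸ ha)
          simp [this])]
    · -- no delimiter at all
      rw [if_neg (by simp [isIn_singleton, hsl]),
        if_neg (by simp [isIn_singleton, hdot]),
        if_neg (by simp [isIn_singleton, hsl, hdot])]
      simp
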